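-- pv_equiv track=rewrite | github.com/aleattene/python-workbook | Chap_05/129_TokenizingString.py | tokenizingString
-- ===== SOURCE A (Python) =====
-- def tokenizingString(string):
--     # LIST of the MATHEMATICAL OPERATORS
--     tokens = ["+", "-", "*", "/", "^", "(", ")"]
--     tokens_list = []
--     i = 0
--     while i < len(string):
--         # Check MATHEMATICAL OPERATORS
--         if string[i] in tokens and string[i] not in tokens_list:
--             tokens_list.append(string[i])
--         # Check INTEGERS
--         elif string[i].isdigit():
--             tmp = ""
--             # LOOP for NUMBERS > 1 DIGITS
--             while i < len(string):
--                 if string[i].isdigit():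
--                     tmp += string[i]
--                     i += 1
--                 else:
--                     i -= 1
--                     break
--             if tmp not in tokens_list:
--                 tokens_list.append(tmp)
--         i += 1
--     return tokens_list      # RETURN LIST of TOKENS
-- ===== SOURCE B (Python) =====
-- def tokenizingString(string):
--     # Two-phase: flat char scan with a digit buffer, then order-preserving dedup.
--     ops = "+-*/^()"
--     raw = []
--     buf = ""
--     for ch in string:
--         if ch.isdigit():
--             buf += ch
--         else:
--             if buf:
--                 raw.append(buf)
--                 buf = ""
--             if ch in ops:
--                 raw.append(ch)
--     if buf:
--         raw.append(buf)
--     return list(dict.fromkeys(raw))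
-- ===== Notes on version B (the rewrite author's own statement) =====
-- stated objective: faster
-- what changed: Replaces A's index-manipulating while loop with nested digit loop, backtracking and a linear membership scan over the result list for each token by a two-phase design: a flat for-each-char scan with a digit buffer producing the raw token list, then one order-preserving hash-based dedup pass (dict.fromkeys).
import Mathlib
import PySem

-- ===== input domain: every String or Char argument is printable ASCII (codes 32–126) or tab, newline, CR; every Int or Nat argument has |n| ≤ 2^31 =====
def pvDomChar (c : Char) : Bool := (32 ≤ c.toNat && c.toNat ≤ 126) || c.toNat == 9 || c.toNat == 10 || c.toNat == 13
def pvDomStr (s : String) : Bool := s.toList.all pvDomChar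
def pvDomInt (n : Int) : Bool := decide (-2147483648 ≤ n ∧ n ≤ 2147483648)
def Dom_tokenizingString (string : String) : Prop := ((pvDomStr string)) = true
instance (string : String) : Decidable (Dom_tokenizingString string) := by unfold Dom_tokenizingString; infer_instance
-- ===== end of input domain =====

-- B replaces A's index-backtracking scan with a flat buffered scan plus an order-preserving
-- dedup pass (objective: simpler decomposition, same asymptotics).

-- ===== PORT A =====
-- the 7 operator strings of A's `tokens` list, as characters (each is one char)
def pvOps : List Char := ['+', '-', '*', '/', '^', '(', ')']

-- A's inner `while` loop: consumes the digit run starting at i, accumulating into tmp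
-- (tmp kept as List Char; Python's str += char); returns (tmp, final i).
-- The structural fuel (= characters remaining, always sufficient) only makes the loop total.
-- `Char.isDigit` is exact for Python's str.isdigit on single ASCII chars (the stated domain).
def innerA (s : List Char) (fuel : Nat) (i : Nat) (tmp : List Char) : List Char × Nat :=
  match fuel with
  | 0 => (tmp, i)
  | fuel + 1 =>
    if h : i < s.length then
      if (s[i]'h).isDigit then innerA s fuel (i + 1) (tmp ++ [s[i]'h])
      else (tmp, i - 1)
    else (tmp, i)

-- A's outer `while` loop over index i with the accumulated tokens_list
def outerA (s : List Char) (fuel : Nat) (i : Nat) (acc : List String) : List String :=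
  match fuel with
  | 0 => acc
  | fuel + 1 =>
    if h : i < s.length then
      let c := s[i]'h
      if c ∈ pvOps ∧ String.mk [c] ∉ acc then
        outerA s fuel (i + 1) (acc ++ [String.mk [c]])
      else if c.isDigit then
        let r := innerA s (s.length - i) i []
        outerA s fuel (r.2 + 1)
          (if String.mk r.1 ∉ acc then acc ++ [String.mk r.1] else acc)
      else outerA s fuel (i + 1) acc
    else acc

def tokenizingString (string : String) : List String :=
  outerA string.toList string.toList.length 0 []

-- ===== PORT B =====
-- one step of B's `for ch in string` loop; state = (raw token list, digit buffer)
def stepB (st : List String × List Char) (c : Char) : List String × List Char :=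
  if c.isDigit then (st.1, st.2 ++ [c])
  else
    let t := if st.2 ≠ [] then st.1 ++ [String.mk st.2] else st.1
    if c ∈ ['+', '-', '*', '/', '^', '(', ')'] then (t ++ [String.mk [c]], []) else (t, [])

-- B's `list(dict.fromkeys(raw))`: order-preserving dedup (first occurrence kept)
def dedupGo (acc : List String) : List String → List String
  | [] => acc
  | t :: ts => if t ∈ acc then dedupGo acc ts else dedupGo (acc ++ [t]) ts

def tokenizingString_alt (string : String) : List String :=
  let st := string.toList.foldl stepB ([], [])
  let raw := if st.2 ≠ [] then st.1 ++ [String.mk st.2] else st.1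
  dedupGo [] raw

-- ===== PRECONDITION & SPEC =====
def Spec_tokenizingString (string : String) (out : List String) : Prop := out = tokenizingString_alt string
instance (string : String) (out : List String) : Decidable (Spec_tokenizingString string out) := by unfold Spec_tokenizingString; infer_instance

-- ===== CLAIM (what is proved, stated in full; the proofs are below) =====
def Claim_equal_tokenizingString : Prop := ∀ (string : String), Dom_tokenizingString string → Spec_tokenizingString string (tokenizingString string)

-- ===== LEMMAS AND PROOFS =====

def flushT (st : List String × List Char) : List String :=
  if st.2 ≠ [] then st.1 ++ [String.mk st.2] else st.1

def rawT (l : List Char) : List String := flushT (l.foldl stepB ([], []))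

theorem foldl_stepB_prefix (l : List Char) (t0 t : List String) (b : List Char) :
    l.foldl stepB (t0 ++ t, b) =
      (t0 ++ (l.foldl stepB (t, b)).1, (l.foldl stepB (t, b)).2) := by
  induction l generalizing t b with
  | nil => simp
  | cons c l ih =>
    simp only [List.foldl_cons, stepB]
    split_ifs with h1 h2 h3 <;> simp_all [List.append_assoc, ih]

theorem flushT_prefix (t0 t : List String) (b : List Char) :
    flushT (t0 ++ t, b) = t0 ++ flushT (t, b) := by
  simp only [flushT]; split_ifs <;> simp [List.append_assoc]

theorem foldl_stepB_digits (run : List Char) (l : List Char) (t : List String) (b : List Char)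
    (hd : ∀ c ∈ run, c.isDigit) :
    (run ++ l).foldl stepB (t, b) = l.foldl stepB (t, b ++ run) := by
  induction run generalizing b with
  | nil => simp
  | cons c run ih =>
    have hc : c.isDigit := hd c (by simp)
    simp only [List.cons_append, List.foldl_cons, stepB, hc, if_true]
    rw [ih _ (fun x hx => hd x (by simp [hx]))]
    simp [List.append_assoc]

theorem rawT_cons_nondigit (c : Char) (l : List Char) (hc : ¬ c.isDigit) :
    rawT (c :: l) =
      (if c ∈ ['+', '-', '*', '/', '^', '(', ')'] then [String.mk [c]] else []) ++ rawT l := by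
  simp only [rawT, List.foldl_cons]
  have hs : stepB ([], []) c =
      ((if c ∈ ['+', '-', '*', '/', '^', '(', ')'] then [String.mk [c]] else []), []) := by
    simp [stepB, hc]; split_ifs <;> simp
  rw [hs]
  have h2 := foldl_stepB_prefix l (if c ∈ ['+', '-', '*', '/', '^', '(', ')'] then [String.mk [c]] else []) [] []
  simp only [List.append_nil] at h2
  rw [h2, flushT_prefix]

theorem rawT_run (run rest : List Char) (hne : run ≠ []) (hd : ∀ c ∈ run, c.isDigit)
    (hrest : rest = [] ∨ ∃ c l, rest = c :: l ∧ ¬ c.isDigit) :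
    rawT (run ++ rest) = String.mk run :: rawT rest := by
  rcases hrest with h | ⟨c, l, rfl, hc⟩
  · subst h
    have h1 := foldl_stepB_digits run [] [] [] hd
    simp only [List.append_nil, List.foldl_nil] at h1
    simp [rawT, h1, flushT, hne]
  · simp only [rawT, List.foldl_cons]
    rw [foldl_stepB_digits run (c :: l) [] [] hd]
    simp only [List.nil_append, List.foldl_cons]
    have hs : stepB ([], run) c =
        ([String.mk run] ++ (if c ∈ ['+', '-', '*', '/', '^', '(', ')'] then [String.mk [c]] else []), []) := by
      simp [stepB, hc, hne]; split_ifs <;> simp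
    have hs2 : stepB ([], []) c =
        ((if c ∈ ['+', '-', '*', '/', '^', '(', ')'] then [String.mk [c]] else []), []) := by
      simp [stepB, hc]; split_ifs <;> simp
    rw [hs, hs2]
    rw [foldl_stepB_prefix l [String.mk run] _ []]
    rw [flushT_prefix]
    simp

theorem ops_not_digit (c : Char) (h : c ∈ pvOps) : ¬ c.isDigit := by
  simp only [pvOps, List.mem_cons, List.not_mem_nil, or_false] at h
  rcases h with rfl | rfl | rfl | rfl | rfl | rfl | rfl <;> decide

theorem innerA_eq (s : List Char) (fuel i : Nat) (tmp : List Char) (hi : i ≤ s.length)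
    (hf : s.length - i ≤ fuel) :
    innerA s fuel i tmp =
      (tmp ++ (s.drop i).takeWhile Char.isDigit,
       if i + ((s.drop i).takeWhile Char.isDigit).length = s.length then s.length
       else i + ((s.drop i).takeWhile Char.isDigit).length - 1) := by
  induction fuel generalizing i tmp with
  | zero =>
    have : i = s.length := by omega
    subst this
    simp [innerA]
  | succ fuel ih =>
    rw [innerA]
    by_cases h : i < s.length
    · rw [dif_pos h]
      have hdrop : s.drop i = s[i] :: s.drop (i + 1) := List.drop_eq_getElem_cons h
      by_cases hd : (s[i]'h).isDigit
      · rw [if_pos hd, ih (i + 1) _ (by omega) (by omega), hdrop, List.takeWhile_cons]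
        simp only [hd, if_true, List.length_cons, Prod.mk.injEq]
        refine ⟨by simp, ?_⟩
        split_ifs <;> omega
      · rw [if_neg hd, hdrop, List.takeWhile_cons]
        simp only [hd, Bool.false_eq_true, if_false, List.length_nil, Nat.add_zero,
          List.append_nil]
        have : ¬ i = s.length := by omega
        simp [this]
    · rw [dif_neg h]
      have : i = s.length := by omega
      subst this
      simp

theorem dropWhile_head_false (p : Char → Bool) (l : List Char) :
    l.dropWhile p = [] ∨ ∃ c r, l.dropWhile p = c :: r ∧ ¬ p c := by
  induction l with
  | nil => left; rfl
  | cons c l ih =>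
    by_cases hc : p c
    · simpa [List.dropWhile_cons, hc] using ih
    · right; exact ⟨c, l, by simp [List.dropWhile_cons, hc], hc⟩

theorem outerA_past_end (s : List Char) (fuel i : Nat) (acc : List String)
    (hi : ¬ i < s.length) : outerA s fuel i acc = acc := by
  cases fuel with
  | zero => rfl
  | succ fuel => rw [outerA, dif_neg hi]

theorem outerA_eq (s : List Char) (fuel i : Nat) (acc : List String) (hi : i ≤ s.length)
    (hf : s.length - i ≤ fuel) :
    outerA s fuel i acc = dedupGo acc (rawT (s.drop i)) := by
  induction fuel generalizing i acc with
  | zero =>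
    have : i = s.length := by omega
    subst this
    simp [outerA, rawT, flushT, dedupGo]
  | succ fuel ih =>
    by_cases h : i < s.length
    · rw [outerA, dif_pos h]
      have hdrop : s.drop i = s[i] :: s.drop (i + 1) := List.drop_eq_getElem_cons h
      by_cases hcond : s[i] ∈ pvOps ∧ String.mk [s[i]] ∉ acc
      · rw [if_pos hcond]
        have hop : s[i] ∈ ['+', '-', '*', '/', '^', '(', ')'] := by simpa [pvOps] using hcond.1
        rw [hdrop, rawT_cons_nondigit _ _ (ops_not_digit _ hcond.1), if_pos hop]
        simp only [List.singleton_append, dedupGo, if_neg hcond.2]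
        exact ih (i + 1) _ (by omega) (by omega)
      · rw [if_neg hcond]
        by_cases hd : (s[i]'h).isDigit
        · -- digit branch: A consumes the whole digit run at once
          rw [if_pos hd]
          set run := (s.drop i).takeWhile Char.isDigit with hrun
          have hrun_ne : run ≠ [] := by
            rw [hrun, hdrop, List.takeWhile_cons]; simp [hd]
          have hrun_d : ∀ x ∈ run, x.isDigit := fun x hx => List.mem_takeWhile_imp hx
          have hsplit : s.drop i = run ++ (s.drop i).dropWhile Char.isDigit := by
            rw [hrun]; exact (List.takeWhile_append_dropWhile).symm
          have hlen_run : run.length ≤ s.length - i := by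
            have := congrArg List.length hsplit
            simp only [List.length_append, List.length_drop] at this
            omega
          have hdw : (s.drop i).dropWhile Char.isDigit = s.drop (i + run.length) := by
            have h2 : (run ++ (s.drop i).dropWhile Char.isDigit).drop run.length
                = (s.drop i).dropWhile Char.isDigit := List.drop_left
            rw [← h2, ← hsplit, List.drop_drop, Nat.add_comm]
          have hiA := innerA_eq s (s.length - i) i [] (by omega) (by omega)
          rw [← hrun] at hiA
          have hraw : rawT (s.drop i) = String.mk run :: rawT (s.drop (i + run.length)) := by
            have hrest := dropWhile_head_false Char.isDigit (s.drop i)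
            rw [hdw] at hrest
            conv_lhs => rw [hsplit, hdw]
            exact rawT_run run _ hrun_ne hrun_d hrest
          have hrlen1 : 1 ≤ run.length := by
            cases hq : run with
            | nil => exact absurd hq hrun_ne
            | cons a b => simp
          rw [hiA]
          simp only [List.nil_append]
          by_cases hend : i + run.length = s.length
          · rw [if_pos hend]
            rw [outerA_past_end s fuel (s.length + 1) _ (by omega)]
            rw [hraw]
            have hnil : s.drop (i + run.length) = [] := by rw [hend]; simp
            rw [hnil]
            simp only [rawT, List.foldl_nil, flushT]
            simp only [ne_eq, not_true_eq_false, if_false, dedupGo]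
            by_cases hm : String.mk run ∈ acc
            · rw [if_neg (by simpa using hm), if_pos hm]
            · rw [if_pos (by simpa using hm), if_neg hm]
          · rw [if_neg hend]
            have hnext : i + run.length - 1 + 1 = i + run.length := by omega
            rw [hnext, hraw]
            rw [ih (i + run.length) _ (by omega) (by omega)]
            simp only [dedupGo]
            by_cases hm : String.mk run ∈ acc
            · rw [if_neg (by simpa using hm), if_pos hm]
            · rw [if_pos (by simpa using hm), if_neg hm]
        · rw [if_neg hd]
          rw [hdrop, rawT_cons_nondigit _ _ (by simpa using hd)]
          by_cases hmem : s[i] ∈ ['+', '-', '*', '/', '^', '(', ')']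
          · have hin : String.mk [s[i]] ∈ acc := by
              by_contra hni
              exact hcond ⟨by simpa [pvOps] using hmem, hni⟩
            rw [if_pos hmem]
            simp only [List.singleton_append, dedupGo, if_pos hin]
            exact ih (i + 1) _ (by omega) (by omega)
          · rw [if_neg hmem]
            simp only [List.nil_append]
            exact ih (i + 1) _ (by omega) (by omega)
    · rw [outerA, dif_neg h]
      have : i = s.length := by omega
      subst this
      simp [rawT, flushT, dedupGo]

-- ===== VERDICT (by name: the statement is the Claim_ definition above) =====
theorem tokenizingString_spec : Claim_equal_tokenizingString := by
  intro string _
  unfold Spec_tokenizingString tokenizingString tokenizingString_alt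
  rw [outerA_eq string.toList string.toList.length 0 [] (by omega) (by omega)]
  simp [rawT, flushT]
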